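-- pv_equiv track=rewrite | github.com/tobiashaugeland/AoC-2021 | 17/17.py | get_highest_point
-- ===== SOURCE A (Python) =====
-- def get_highest_point(y_velocity):
--     y_pos = 0
--     last_y = 0
--     while True:
--         y_pos += y_velocity
--         y_velocity -= 1
--         if y_pos <= last_y:
--             break
--         last_y = y_pos
--     return y_pos
-- ===== SOURCE B (Python) =====
-- def get_highest_point(y_velocity):
--     # closed form: peak of the arc is the triangular number v(v+1)/2 for v > 0;
--     # for v <= 0 the first step already goes down, returning v.
--     if y_velocity > 0:
--         return y_velocity * (y_velocity + 1) // 2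
--     return y_velocity
-- ===== Notes on version B (the rewrite author's own statement) =====
-- stated objective: faster
-- what changed: replaced the step-by-step simulation loop with the closed-form triangular number v*(v+1)//2 for positive velocity (v otherwise)
import Mathlib
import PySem

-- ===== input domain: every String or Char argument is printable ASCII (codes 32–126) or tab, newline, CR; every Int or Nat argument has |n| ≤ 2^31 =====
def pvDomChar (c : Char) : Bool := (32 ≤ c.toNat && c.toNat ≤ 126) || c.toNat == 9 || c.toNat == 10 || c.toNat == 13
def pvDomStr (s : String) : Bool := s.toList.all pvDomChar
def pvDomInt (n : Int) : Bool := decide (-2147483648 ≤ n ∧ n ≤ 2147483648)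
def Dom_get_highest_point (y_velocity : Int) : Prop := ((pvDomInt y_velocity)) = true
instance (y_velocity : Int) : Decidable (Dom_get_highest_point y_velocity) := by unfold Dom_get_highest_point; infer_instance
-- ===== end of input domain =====

-- B replaces A's step-by-step ascent simulation with the closed-form triangular number (faster).


-- ===== PORT A =====
-- Loop of A: at every loop head last_y equals y_pos (initially both 0, and the loop
-- sets last_y := y_pos before continuing), so the state is (y_pos, y_velocity).
def get_highest_point_loop (y_pos : Int) (y_velocity : Int) : Int :=
  let y' := y_pos + y_velocity
  if y' ≤ y_pos then y'
  else get_highest_point_loop y' (y_velocity - 1)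
termination_by y_velocity.toNat
decreasing_by omega

def get_highest_point (y_velocity : Int) : Int :=
  get_highest_point_loop 0 y_velocity

-- ===== PORT B =====
def get_highest_point_alt (y_velocity : Int) : Int :=
  if y_velocity > 0 then PySem.Int.floordiv (y_velocity * (y_velocity + 1)) 2
  else y_velocity

-- ===== PRECONDITION & SPEC =====
def Spec_get_highest_point (y_velocity : Int) (out : Int) : Prop := out = get_highest_point_alt y_velocity
instance (y_velocity : Int) (out : Int) : Decidable (Spec_get_highest_point y_velocity out) := by unfold Spec_get_highest_point; infer_instance

-- ===== CLAIM (what is proved, stated in full; the proofs are below) =====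
def Claim_equal_get_highest_point : Prop := ∀ (y_velocity : Int), Dom_get_highest_point y_velocity → Spec_get_highest_point y_velocity (get_highest_point y_velocity)

-- ===== LEMMAS AND PROOFS =====
lemma loop_tri (n : Nat) : ∀ y : Int,
    2 * get_highest_point_loop y ((n : Int) + 1) = 2 * y + ((n : Int) + 1) * ((n : Int) + 2) := by
  induction n with
  | zero =>
    intro y
    rw [get_highest_point_loop, if_neg (by omega), get_highest_point_loop, if_pos (by omega)]
    ring
  | succ m ih =>
    intro y
    rw [get_highest_point_loop, if_neg (by omega)]
    push_cast
    rw [show ((m:Int) + 1 + 1 - 1) = (m:Int) + 1 from by ring, ih (y + ((m : Int) + 1 + 1))]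
    ring

-- ===== VERDICT (by name: the statement is the Claim_ definition above) =====
theorem get_highest_point_spec : Claim_equal_get_highest_point := by
  unfold Claim_equal_get_highest_point Spec_get_highest_point
  intro v _
  unfold get_highest_point get_highest_point_alt
  by_cases hv : v > 0
  · rw [if_pos hv, PySem.Int.floordiv_eq_ediv_of_pos (by omega)]
    obtain ⟨n, rfl⟩ : ∃ n : Nat, v = (n : Int) + 1 :=
      ⟨(v - 1).toNat, by omega⟩
    have h := loop_tri n 0
    have hm : ((n : Int) + 1) * ((n : Int) + 2) = (n:Int)*(n:Int) + 3*(n:Int) + 2 := by ring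
    rw [hm] at h
    rw [show ((n:Int) + 1) * ((n:Int) + 1 + 1) = (n:Int)*(n:Int) + 3*(n:Int) + 2 from by ring]
    generalize hk : (n:Int)*(n:Int) = k at h ⊢
    omega
  · rw [if_neg hv, get_highest_point_loop, if_pos (by omega)]
    omega
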